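-- pv_equiv track=rewrite | github.com/zachstence/inkplate-todo | inkplate-todo/src/fonts/fonts.py | _render_vmap
-- ===== SOURCE A (Python) =====
-- def _validate_vmap(data, height, width):
--     bpc = (height - 1)//8 + 1
--     msg = "Vertical map, invalid data length got {} expected {}"
--     assert len(data) == bpc * width, msg.format(len(data), bpc * width)
--
-- def _render_vmap(data, height, width, reverse) -> list[list[bool]]:
--     _validate_vmap(data, height, width)
--
--     pixels: list[list[bool]] = []
--
--     bytes_per_col = (height - 1)//8 + 1
--     for r in range(height):
--         row: list[bool] = []
--         for c in range(width):
--             byte = data[c * bytes_per_col + r//8]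
--             if reverse:
--                 bit = (byte & (1 << (7 - (r % 8)))) > 0
--             else:
--                 bit = (byte & (1 << (r % 8))) > 0
--             row.append(bit)
--         pixels.append(row)
--
--     return pixels
-- ===== SOURCE B (Python) =====
-- def _validate_vmap(data, height, width):
--     bpc = (height - 1)//8 + 1
--     msg = "Vertical map, invalid data length got {} expected {}"
--     assert len(data) == bpc * width, msg.format(len(data), bpc * width)
--
-- def _render_vmap(data, height, width, reverse) -> list[list[bool]]:
--     # Column-major: expand each column's bytes into a bit list, then transpose.
--     _validate_vmap(data, height, width)
--     bpc = (height - 1)//8 + 1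
--     cols: list[list[bool]] = []
--     for c in range(width):
--         bits: list[bool] = []
--         for byte in data[c * bpc:(c + 1) * bpc]:
--             for bit_pos in range(8):
--                 mask = 1 << (7 - bit_pos) if reverse else 1 << bit_pos
--                 bits.append(byte & mask > 0)
--         cols.append(bits[:height])
--     return [[col[r] for col in cols] for r in range(height)]
-- ===== Notes on version B (the rewrite author's own statement) =====
-- stated objective: alternative
-- what changed: B traverses the data column-major: it expands each column's byte slice into a flat bit list, truncates it to height, and transposes, instead of A's per-pixel row-major gather with byte-index arithmetic per pixel.
import Mathlib
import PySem

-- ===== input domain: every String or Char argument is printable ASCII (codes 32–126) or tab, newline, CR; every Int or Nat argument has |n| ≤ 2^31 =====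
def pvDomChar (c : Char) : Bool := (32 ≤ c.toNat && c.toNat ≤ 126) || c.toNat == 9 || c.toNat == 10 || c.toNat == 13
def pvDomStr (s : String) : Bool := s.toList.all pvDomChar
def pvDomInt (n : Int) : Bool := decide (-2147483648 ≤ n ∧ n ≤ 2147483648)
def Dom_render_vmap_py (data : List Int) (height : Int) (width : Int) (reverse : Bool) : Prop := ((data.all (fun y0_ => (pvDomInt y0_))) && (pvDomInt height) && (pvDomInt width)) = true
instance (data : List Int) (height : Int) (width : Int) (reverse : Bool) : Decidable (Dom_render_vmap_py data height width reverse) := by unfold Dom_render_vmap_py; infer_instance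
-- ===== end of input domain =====

-- B unpacks the bitmap column-major (expand each column's bytes into bits, then transpose)
-- instead of A's per-pixel row-major gather; objective: alternative decomposition, same cost.

-- ===== PORT A =====
-- literal port of A's row-major gather; '1 << k' is '(1:Int) <<< k.toNat' (exact: 0 ≤ r%8 < 8)
def render_vmap_py (data : List Int) (height : Int) (width : Int) (reverse : Bool) : List (List Bool) :=
  let bytes_per_col : Int := PySem.Int.floordiv (height - 1) 8 + 1
  (PySem.List.pyRange 0 height 1).foldl (fun pixels r =>
    let row : List Bool := (PySem.List.pyRange 0 width 1).foldl (fun row c =>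
      let byte : Int := PySem.List.pyGetD data (c * bytes_per_col + PySem.Int.floordiv r 8) 0
      let bit : Bool :=
        if reverse then decide (PySem.Int.band byte ((1:Int) <<< (7 - PySem.Int.mod r 8).toNat) > 0)
        else decide (PySem.Int.band byte ((1:Int) <<< (PySem.Int.mod r 8).toNat) > 0)
      row ++ [bit]) []
    pixels ++ [row]) []

-- ===== PORT B =====
-- literal port of B: per-column bit expansion, truncation to height, then transposition
def render_vmap_py_alt (data : List Int) (height : Int) (width : Int) (reverse : Bool) : List (List Bool) :=
  let bpc : Int := PySem.Int.floordiv (height - 1) 8 + 1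
  let cols : List (List Bool) := (PySem.List.pyRange 0 width 1).foldl (fun cols c =>
    let bits : List Bool := (PySem.List.slice data (some (c * bpc)) (some ((c + 1) * bpc))).foldl
      (fun bits byte =>
        (PySem.List.pyRange 0 8 1).foldl (fun bits bit_pos =>
          let mask : Int := if reverse then (1:Int) <<< (7 - bit_pos).toNat else (1:Int) <<< bit_pos.toNat
          bits ++ [decide (PySem.Int.band byte mask > 0)]) bits) []
    cols ++ [PySem.List.slice bits none (some height)]) []
  (PySem.List.pyRange 0 height 1).map (fun r =>
    cols.map (fun col => (PySem.List.pyGet? col r).getD false))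

-- ===== PRECONDITION & SPEC =====
-- Pre_: exactly the inputs on which A's assert in _validate_vmap passes (else AssertionError)
def Pre_render_vmap_py (data : List Int) (height : Int) (width : Int) (reverse : Bool) : Prop :=
  (data.length : Int) = (PySem.Int.floordiv (height - 1) 8 + 1) * width
instance (data : List Int) (height : Int) (width : Int) (reverse : Bool) : Decidable (Pre_render_vmap_py data height width reverse) := by unfold Pre_render_vmap_py; infer_instance
def pvWitness_render_vmap_py : List Int × Int × Int × Bool := ([5], 3, 1, false)

def Spec_render_vmap_py (data : List Int) (height : Int) (width : Int) (reverse : Bool) (out : List (List Bool)) : Prop := out = render_vmap_py_alt data height width reverse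
instance (data : List Int) (height : Int) (width : Int) (reverse : Bool) (out : List (List Bool)) : Decidable (Spec_render_vmap_py data height width reverse out) := by unfold Spec_render_vmap_py; infer_instance

-- ===== CLAIM (what is proved, stated in full; the proofs are below) =====
def Claim_equal_render_vmap_py : Prop := ∀ (data : List Int) (height : Int) (width : Int) (reverse : Bool), Dom_render_vmap_py data height width reverse → Pre_render_vmap_py data height width reverse → Spec_render_vmap_py data height width reverse (render_vmap_py data height width reverse)

-- ===== LEMMAS AND PROOFS =====

-- the value of pixel (r, c) that both programs compute
def pvPix (data : List Int) (bpc : Int) (reverse : Bool) (r c : Int) : Bool :=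
  decide (PySem.Int.band (PySem.List.pyGetD data (c * bpc + PySem.Int.floordiv r 8) 0)
    ((1:Int) <<< (if reverse then (7 - PySem.Int.mod r 8).toNat else (PySem.Int.mod r 8).toNat)) > 0)

lemma renderA_eq_grid (data : List Int) (height width : Int) (reverse : Bool) :
    render_vmap_py data height width reverse =
      (PySem.List.pyRange 0 height 1).map (fun r =>
        (PySem.List.pyRange 0 width 1).map
          (pvPix data (PySem.Int.floordiv (height - 1) 8 + 1) reverse r)) := by
  unfold render_vmap_py pvPix
  cases reverse <;>
    simp [← List.flatMap_def, ← List.map_eq_flatMap]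

-- bits of one column, flattened
def pvBits (reverse : Bool) (chunk : List Int) : List Bool :=
  chunk.flatMap (fun byte => (PySem.List.pyRange 0 8 1).map (fun p =>
    decide (PySem.Int.band byte (if reverse then (1:Int) <<< (7 - p).toNat else (1:Int) <<< p.toNat) > 0)))

lemma renderB_eq (data : List Int) (height width : Int) (reverse : Bool) :
    render_vmap_py_alt data height width reverse =
      (PySem.List.pyRange 0 height 1).map (fun r =>
        ((PySem.List.pyRange 0 width 1).map (fun c =>
          PySem.List.slice (pvBits reverse (PySem.List.slice data
            (some (c * (PySem.Int.floordiv (height - 1) 8 + 1)))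
            (some ((c + 1) * (PySem.Int.floordiv (height - 1) 8 + 1))))) none (some height))).map
          (fun col => (PySem.List.pyGet? col r).getD false)) := by
  unfold render_vmap_py_alt pvBits
  simp only [PySem.List.foldl_append_singleton_eq_map, PySem.List.foldl_append_eq_flatMap,
    List.nil_append]

lemma pvBits_getElem? (reverse : Bool) (chunk : List Int) (k : Nat) (hk : k < 8 * chunk.length) :
    (pvBits reverse chunk)[k]? = some (decide (PySem.Int.band (chunk.getD (k / 8) 0)
      (if reverse then (1:Int) <<< (7 - ((k % 8 : Nat) : Int)).toNat
       else (1:Int) <<< (((k % 8 : Nat) : Int)).toNat) > 0)) := by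
  induction chunk generalizing k with
  | nil => simp at hk
  | cons b t ih =>
    have hlen : ((PySem.List.pyRange 0 8 1).map (fun p =>
        decide (PySem.Int.band b (if reverse then (1:Int) <<< (7 - p).toNat
          else (1:Int) <<< p.toNat) > 0))).length = 8 := by
      simp [PySem.List.length_pyRange_one]
    rw [pvBits, List.flatMap_cons]
    by_cases h8 : k < 8
    · rw [List.getElem?_append_left (by omega)]
      have h08 : PySem.List.pyRange 0 8 1 = [0, 1, 2, 3, 4, 5, 6, 7] := by decide
      rw [h08]
      interval_cases k
      all_goals simp
      all_goals exact Iff.rfl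
    · rw [List.getElem?_append_right (by omega)]
      have ht := ih (k - 8) (by simp only [List.length_cons] at hk; omega)
      rw [pvBits] at ht
      rw [hlen, ht]
      have hdiv : k / 8 = (k - 8) / 8 + 1 := by omega
      have hmod : (k - 8) % 8 = k % 8 := by omega
      rw [hdiv, hmod, List.getD_cons_succ]

-- pointwise agreement of the two grids
lemma pointwise (data : List Int) (height width : Int) (reverse : Bool)
    (hpre : (data.length : Int) = (PySem.Int.floordiv (height - 1) 8 + 1) * width)
    (r c : Int) (hr0 : 0 ≤ r) (hr : r < height) (hc0 : 0 ≤ c) (hc : c < width) :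
    ((PySem.List.pyGet? (PySem.List.slice (pvBits reverse (PySem.List.slice data
        (some (c * (PySem.Int.floordiv (height - 1) 8 + 1)))
        (some ((c + 1) * (PySem.Int.floordiv (height - 1) 8 + 1))))) none (some height)) r).getD false)
      = pvPix data (PySem.Int.floordiv (height - 1) 8 + 1) reverse r c := by
  have hfd : PySem.Int.floordiv (height - 1) 8 = (height - 1) / 8 :=
    PySem.Int.floordiv_eq_ediv_of_pos (by norm_num)
  set q : Int := PySem.Int.floordiv (height - 1) 8 + 1 with hqdef
  have hq0 : 0 < q := by rw [hqdef, hfd]; omega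
  have hh8 : height ≤ 8 * q := by rw [hqdef, hfd]; omega
  -- name the Nat versions of everything
  have hr' : r = ((r.toNat : Nat) : Int) := (Int.toNat_of_nonneg hr0).symm
  set rn : Nat := r.toNat with hrn
  set m : Nat := (c * q).toNat with hmdef
  have hm' : c * q = ((m : Nat) : Int) := (Int.toNat_of_nonneg (mul_nonneg hc0 (le_of_lt hq0))).symm
  set n : Nat := ((c + 1) * q).toNat with hndef
  have hn' : (c + 1) * q = ((n : Nat) : Int) :=
    (Int.toNat_of_nonneg (mul_nonneg (by omega) (le_of_lt hq0))).symm
  have hcw : (c + 1) * q ≤ q * width := by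
    rw [mul_comm q width]; exact mul_le_mul_of_nonneg_right (by omega) (le_of_lt hq0)
  have hlen : (data.length : Int) = q * width := hpre
  have hnm : (m : Int) + q = (n : Int) := by rw [← hm', ← hn']; ring
  have hqn : q.toNat ≤ data.length - m ∧ n - m = q.toNat ∧ m + q.toNat ≤ data.length := by omega
  -- the column chunk
  rw [hm', hn', PySem.List.slice_natCast]
  have hchunklen : (((data.drop m).take (n - m)).length = q.toNat) := by
    simp only [List.length_take, List.length_drop]
    omega
  -- the row lookup into the truncated column
  rw [PySem.List.slice_to _ (le_of_lt (lt_of_le_of_lt hr0 hr)), hr',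
    PySem.List.pyGet?_natCast,
    List.getElem?_take_of_lt (by omega : rn < height.toNat),
    pvBits_getElem? reverse _ rn (by rw [hchunklen]; omega)]
  -- both sides read the same byte and test the same mask
  have hbyte : ((data.drop m).take (n - m)).getD (rn / 8) 0 = data.getD (m + rn / 8) 0 := by
    rw [List.getD_eq_getElem?_getD, List.getD_eq_getElem?_getD,
      List.getElem?_take_of_lt (by omega : rn / 8 < n - m), List.getElem?_drop]
  have hfr : PySem.Int.floordiv ((rn : Nat) : Int) 8 = ((rn / 8 : Nat) : Int) := by
    exact_mod_cast PySem.Int.floordiv_natCast rn 8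
  have hidx : c * q + PySem.Int.floordiv ((rn : Nat) : Int) 8 = (((m + rn / 8 : Nat)) : Int) := by
    rw [hm', hfr]; push_cast; ring
  have hmod : PySem.Int.mod ((rn : Nat) : Int) 8 = ((rn % 8 : Nat) : Int) := by
    exact_mod_cast PySem.Int.mod_natCast rn 8
  unfold pvPix
  rw [hidx, hmod, PySem.List.pyGetD_natCast, Option.getD_some, hbyte]
  cases reverse <;> rfl

-- ===== VERDICT (by name: the statement is the Claim_ definition above) =====
theorem render_vmap_py_spec : Claim_equal_render_vmap_py := by
  intro data height width reverse _ hpre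
  unfold Spec_render_vmap_py
  rw [renderA_eq_grid, renderB_eq]
  refine List.map_congr_left (fun r hr => ?_)
  rw [List.map_map]
  refine List.map_congr_left (fun c hc => ?_)
  rw [PySem.List.mem_pyRange_one] at hr hc
  exact (pointwise data height width reverse hpre r c hr.1 hr.2 hc.1 hc.2).symm
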